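-- pv_equiv track=rewrite | github.com/zz4353/mrcr | mrcr_image_history/transform.py | _turn_ranges
-- ===== SOURCE A (Python) =====
-- from typing import Any
--
-- def _turn_ranges(messages: list[dict[str, Any]]) -> list[tuple[int, int]]:
--     ranges: list[tuple[int, int]] = []
--     start_index: int | None = None
--
--     for index, message in enumerate(messages):
--         if message.get("role") != "user":
--             continue
--         if start_index is not None:
--             ranges.append((start_index, index - 1))
--         start_index = index
--
--     if start_index is not None:
--         ranges.append((start_index, len(messages) - 1))
--
--     return ranges
-- ===== SOURCE B (Python) =====
-- def _turn_ranges(messages):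
--     # Recursive, right-to-left decomposition: the suffix is solved first and the
--     # pending range END (not a running start) is threaded back; a user message at
--     # i closes the range (i, end) and tells earlier messages to end at i - 1.
--     def go(i):
--         # returns (ranges for messages[i:], end index for the range a user
--         # message before position i would close)
--         if i == len(messages):
--             return [], len(messages) - 1
--         rest, end = go(i + 1)
--         if messages[i].get("role") == "user":
--             return [(i, end)] + rest, i - 1
--         return rest, end
--     return go(0)[0]
-- ===== Notes on version B (the rewrite author's own statement) =====
-- stated objective: alternative
-- what changed: Replaces A's iterative left-to-right state machine (running start_index, final flush) with a recursive right-to-left decomposition: the suffix is solved first and the pending range END is threaded back, each user message closing (i, end) and propagating i-1 as the new end.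
import Mathlib
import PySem

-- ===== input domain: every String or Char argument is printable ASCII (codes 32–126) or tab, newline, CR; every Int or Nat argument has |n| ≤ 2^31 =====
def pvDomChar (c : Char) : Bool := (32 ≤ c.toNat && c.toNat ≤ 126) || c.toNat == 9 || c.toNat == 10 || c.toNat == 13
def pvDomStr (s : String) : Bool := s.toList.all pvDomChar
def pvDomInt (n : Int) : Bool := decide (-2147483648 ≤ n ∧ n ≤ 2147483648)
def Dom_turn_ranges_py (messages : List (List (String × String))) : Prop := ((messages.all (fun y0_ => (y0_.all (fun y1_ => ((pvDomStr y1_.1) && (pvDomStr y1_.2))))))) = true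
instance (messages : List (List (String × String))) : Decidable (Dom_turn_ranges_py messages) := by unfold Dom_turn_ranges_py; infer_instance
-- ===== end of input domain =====

-- B replaces A's forward state machine (running start_index) by a right-to-left recursion threading the pending range end back; alternative decomposition, same cost.

-- ===== PORT A =====
-- loop 'for index, message in enumerate(messages)' carrying (start_index, ranges)
def turnRangesLoopA (msgs : List (List (String × String))) (i : Int)
    (start : Option Int) (ranges : List (Int × Int)) : List (Int × Int) × Option Int :=
  match msgs with
  | [] => (ranges, start)
  | m :: rest =>
    if (PySem.Dict.mk m).get? "role" ≠ some "user" then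
      turnRangesLoopA rest (i + 1) start ranges
    else
      match start with
      | some s => turnRangesLoopA rest (i + 1) (some i) (ranges ++ [(s, i - 1)])
      | none => turnRangesLoopA rest (i + 1) (some i) ranges

def turn_ranges_py (messages : List (List (String × String))) : List (Int × Int) :=
  match turnRangesLoopA messages 0 none [] with
  | (ranges, some s) => ranges ++ [(s, (messages.length : Int) - 1)]
  | (ranges, none) => ranges

-- ===== PORT B =====
-- recursive helper go(i): (ranges of messages[i:], end index for a pending range before i);
-- ported structurally on the suffix list (the suffix result is computed first, as in Source B)
def turnRangesGoB (msgs : List (List (String × String))) (i : Int) (n : Int) :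
    List (Int × Int) × Int :=
  match msgs with
  | [] => ([], n - 1)
  | m :: rest =>
    let (rs, e) := turnRangesGoB rest (i + 1) n
    if (PySem.Dict.mk m).get? "role" = some "user" then ((i, e) :: rs, i - 1)
    else (rs, e)

def turn_ranges_py_alt (messages : List (List (String × String))) : List (Int × Int) :=
  (turnRangesGoB messages 0 (messages.length : Int)).1

-- ===== PRECONDITION & SPEC =====
def Spec_turn_ranges_py (messages : List (List (String × String))) (out : List (Int × Int)) : Prop := out = turn_ranges_py_alt messages
instance (messages : List (List (String × String))) (out : List (Int × Int)) : Decidable (Spec_turn_ranges_py messages out) := by unfold Spec_turn_ranges_py; infer_instance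

-- ===== CLAIM (what is proved, stated in full; the proofs are below) =====
def Claim_equal_turn_ranges_py : Prop := ∀ (messages : List (List (String × String))), Dom_turn_ranges_py messages → Spec_turn_ranges_py messages (turn_ranges_py messages)

-- ===== LEMMAS AND PROOFS =====

-- the list of (global) indices of user messages, the common abstraction
def userIndices (msgs : List (List (String × String))) (i : Int) : List Int :=
  match msgs with
  | [] => []
  | m :: rest =>
    if (PySem.Dict.mk m).get? "role" = some "user" then i :: userIndices rest (i + 1)
    else userIndices rest (i + 1)

-- the end index threaded back past a user-index list (B's second component)
def gSpec : List Int → Int → Int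
  | [], E => E
  | j :: _, _ => j - 1

-- the intended ranges for a user-index list with final end E
def fSpec : List Int → Int → List (Int × Int)
  | [], _ => []
  | j :: js, E => (j, gSpec js E) :: fSpec js E

-- abstract form of A's loop on the user-index list only
def ggLoop (js : List Int) (start : Option Int) (ranges : List (Int × Int)) :
    List (Int × Int) × Option Int :=
  match js, start with
  | [], s => (ranges, s)
  | j :: js', none => ggLoop js' (some j) ranges
  | j :: js', some s => ggLoop js' (some j) (ranges ++ [(s, j - 1)])

theorem loopA_eq_gg (msgs : List (List (String × String))) :
    ∀ i start ranges, turnRangesLoopA msgs i start ranges = ggLoop (userIndices msgs i) start ranges := by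
  induction msgs with
  | nil => intro i start ranges; rfl
  | cons m rest ih =>
    intro i start ranges
    by_cases h : (PySem.Dict.mk m).get? "role" = some "user"
    · cases start <;> simp only [turnRangesLoopA, userIndices, h, ggLoop, ih, ne_eq,
        not_true_eq_false, not_false_eq_true, if_true, if_false, ite_true, ite_false, reduceIte]
    · simp only [turnRangesLoopA, userIndices, h, ggLoop, ih, ne_eq,
        not_true_eq_false, not_false_eq_true, if_true, if_false, ite_true, ite_false, reduceIte]

theorem gg_some_fSpec (js : List Int) : ∀ s ranges E,
    (ggLoop js (some s) ranges).1 ++ [((ggLoop js (some s) ranges).2.getD 0, E)] =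
      ranges ++ fSpec (s :: js) E := by
  induction js with
  | nil => intro s ranges E; simp [ggLoop, fSpec, gSpec]
  | cons j js' ih =>
    intro s ranges E
    simp only [ggLoop, fSpec, gSpec, ih, List.append_assoc, List.cons_append, List.nil_append]

theorem gg_some_isSome (js : List Int) : ∀ s ranges,
    (ggLoop js (some s) ranges).2.isSome := by
  induction js with
  | nil => intro s ranges; rfl
  | cons j js' ih => intro s ranges; simp [ggLoop, ih]

theorem goB_eq_fSpec (msgs : List (List (String × String))) :
    ∀ i n, turnRangesGoB msgs i n =
      (fSpec (userIndices msgs i) (n - 1), gSpec (userIndices msgs i) (n - 1)) := by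
  induction msgs with
  | nil => intro i n; rfl
  | cons m rest ih =>
    intro i n
    by_cases h : (PySem.Dict.mk m).get? "role" = some "user" <;>
      simp [turnRangesGoB, userIndices, h, ih, fSpec, gSpec]

-- ===== VERDICT (by name: the statement is the Claim_ definition above) =====
theorem turn_ranges_py_spec : Claim_equal_turn_ranges_py := by
  intro messages _
  unfold Spec_turn_ranges_py turn_ranges_py turn_ranges_py_alt
  rw [goB_eq_fSpec]
  cases h : userIndices messages 0 with
  | nil =>
    rw [loopA_eq_gg, h]
    simp [ggLoop, fSpec]
  | cons i0 rest =>
    have hA : turnRangesLoopA messages 0 none [] = ggLoop rest (some i0) [] := by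
      rw [loopA_eq_gg, h]; rfl
    have hs := gg_some_isSome rest i0 []
    have hf := gg_some_fSpec rest i0 [] ((messages.length : Int) - 1)
    rcases h2 : (ggLoop rest (some i0) []).2 with _ | s
    · rw [h2] at hs; simp at hs
    · rcases h1 : (ggLoop rest (some i0) []) with ⟨rs, st⟩
      rw [h1] at h2 hf; cases h2
      simpa [hA, h1] using hf
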